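-- pv_equiv track=rewrite | github.com/buffet/phrofr-tkeubgts | scripts/retro_identifier.py | build_stroke
-- ===== SOURCE A (Python) =====
-- def build_stroke(keys):
--     """
--     Transforms an array of keys into a string representing a stroke.
--
--     Example:
--     ['R-', '-R', 'W-', 'S-'] -> "SWR-R"
--     """
--
--     order = [
--         'S-', 'T-', 'K-', 'P-', 'W-', 'H-', 'R-',
--         'A', 'O', '*', 'E', 'U',
--         '-F', '-R', '-P', '-B', '-L', '-G', '-T', '-S', '-D', '-Z',
--     ]
--
--     translate = {key: idx for idx, key in enumerate(order)}
--
--     keys = [translate[key] for key in keys]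
--     keys = list(sorted(keys))
--     keys = [order[key] for key in keys]
--
--     # use " " as seperator if there is none of AO*EU
--     # later this gets replaced with a - when all other - get removed
--     for idx, key in enumerate(keys):
--         if key in 'AO*EU':
--             break
--
--         if key.startswith('-'):
--             keys.insert(idx, ' ')
--             break
--
--     keys = [key.replace("-", "").replace(" ", "-") for key in keys]
--
--     return "".join(keys)
-- ===== SOURCE B (Python) =====
-- def build_stroke(keys):
--     """
--     Transforms an array of keys into a string representing a stroke.
--
--     Counting-sort version: tally each key's slot in the fixed steno order,
--     then emit each letter count-many times; the '-' separator is inserted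
--     exactly when a right-hand key is present but no vowel of AO*EU is.
--     """
--     order = [
--         'S-', 'T-', 'K-', 'P-', 'W-', 'H-', 'R-',
--         'A', 'O', '*', 'E', 'U',
--         '-F', '-R', '-P', '-B', '-L', '-G', '-T', '-S', '-D', '-Z',
--     ]
--     index = {key: idx for idx, key in enumerate(order)}
--     counts = [0] * len(order)
--     for key in keys:
--         counts[index[key]] += 1
--     parts = [order[i].strip('-') * counts[i] for i in range(12)]
--     if any(counts[12:]) and not any(counts[7:12]):
--         parts.append('-')
--     parts += [order[i].strip('-') * counts[i] for i in range(12, len(order))]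
--     return "".join(parts)
-- ===== Notes on version B (the rewrite author's own statement) =====
-- stated objective: alternative
-- what changed: Replaces translate-to-indices/sort/map-back plus the separator-insertion scan and per-key replace calls by a counting sort over the 22 fixed slots: tally counts, emit each stripped letter count-many times, and append '-' exactly when some right-hand count is positive and all vowel counts are zero.
import Mathlib
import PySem

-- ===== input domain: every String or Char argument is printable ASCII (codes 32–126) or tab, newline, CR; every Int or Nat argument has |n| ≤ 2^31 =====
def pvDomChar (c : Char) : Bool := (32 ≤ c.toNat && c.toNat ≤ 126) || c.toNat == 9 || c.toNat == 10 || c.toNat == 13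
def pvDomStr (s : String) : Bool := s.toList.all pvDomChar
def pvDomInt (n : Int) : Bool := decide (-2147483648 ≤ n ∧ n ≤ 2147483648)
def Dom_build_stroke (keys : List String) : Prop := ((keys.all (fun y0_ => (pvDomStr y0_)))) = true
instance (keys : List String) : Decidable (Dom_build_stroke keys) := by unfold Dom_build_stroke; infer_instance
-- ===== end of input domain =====

-- B replaces A's translate→sort→map-back pipeline, separator-insertion scan and per-key replaces
-- by a counting sort over the 22 fixed steno slots.

-- ===== PORT A =====
def bsOrder : List String :=
  ["S-", "T-", "K-", "P-", "W-", "H-", "R-",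
   "A", "O", "*", "E", "U",
   "-F", "-R", "-P", "-B", "-L", "-G", "-T", "-S", "-D", "-Z"]

def bsTranslate : PySem.Dict String Int :=
  (PySem.List.enumerate bsOrder 0).foldl (fun d p => d.insert p.2 p.1) PySem.Dict.empty

-- the `for idx, key in enumerate(keys): … break` separator loop of A
def bsSepLoop : List (Int × String) → List String → List String
  | [], ks => ks
  | (idx, key) :: rest, ks =>
    if PySem.Str.isIn key "AO*EU" then ks
    else if PySem.Str.startswith key "-" then PySem.List.insert ks idx " "
    else bsSepLoop rest ks

def build_stroke (keys : List String) : String :=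
  -- translate[key]: KeyError (= none) outside Pre_, defaulted there
  let keys1 : List Int := keys.map (fun key => (bsTranslate.get? key).getD 0)
  let keys2 : List Int := PySem.List.sorted keys1 (fun x => x) false
  let keys3 : List String := keys2.map (fun key => (PySem.List.pyGet? bsOrder key).getD "")
  let keys4 : List String := bsSepLoop (PySem.List.enumerate keys3 0) keys3
  let keys5 : List String := keys4.map (fun key => PySem.Str.replace (PySem.Str.replace key "-" "") " " "-")
  PySem.Str.join "" keys5

-- ===== PORT B =====
def bsOrderB : List String :=
  ["S-", "T-", "K-", "P-", "W-", "H-", "R-",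
   "A", "O", "*", "E", "U",
   "-F", "-R", "-P", "-B", "-L", "-G", "-T", "-S", "-D", "-Z"]

def bsIndexB : PySem.Dict String Int :=
  (PySem.List.enumerate bsOrderB 0).foldl (fun d p => d.insert p.2 p.1) PySem.Dict.empty

-- `s * n` for a string (Python string repetition; exact: n concatenated copies, empty for n ≤ 0)
def strTimes (s : String) (n : Int) : String :=
  String.ofList (PySem.List.pyRepeat s.toList n)

def build_stroke_alt (keys : List String) : String :=
  -- counts[index[key]] += 1 (index[key] is a KeyError outside Pre_, defaulted there; its value is 0..21, in range)
  let counts : List Int := keys.foldl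
      (fun cs key => cs.modify (((bsIndexB.get? key).getD 0).toNat) (· + 1))
      (List.replicate (PySem.List.len bsOrderB).toNat 0)
  let parts := (PySem.List.pyRange 0 12 1).map
      (fun i => strTimes (PySem.Str.stripChars (PySem.List.pyGetD bsOrderB i "") "-") (PySem.List.pyGetD counts i 0))
  let parts := if ((PySem.List.slice counts (some 12) none).any (fun c => c != 0))
                  && !((PySem.List.slice counts (some 7) (some 12)).any (fun c => c != 0))
               then parts ++ ["-"] else parts
  let parts := parts ++ (PySem.List.pyRange 12 (PySem.List.len bsOrderB) 1).map
      (fun i => strTimes (PySem.Str.stripChars (PySem.List.pyGetD bsOrderB i "") "-") (PySem.List.pyGetD counts i 0))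
  PySem.Str.join "" parts

-- ===== PRECONDITION & SPEC =====
-- Pre_ excludes exactly the inputs containing a key outside the steno order, on which A raises KeyError.
def Pre_build_stroke (keys : List String) : Prop := ∀ k ∈ keys, k ∈ bsOrder
instance (keys : List String) : Decidable (Pre_build_stroke keys) := by unfold Pre_build_stroke; infer_instance

def pvWitness_build_stroke : List String := ["R-", "-R", "W-", "S-"]

def Spec_build_stroke (keys : List String) (out : String) : Prop := out = build_stroke_alt keys
instance (keys : List String) (out : String) : Decidable (Spec_build_stroke keys out) := by unfold Spec_build_stroke; infer_instance

-- ===== CLAIM (what is proved, stated in full; the proofs are below) =====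
def Claim_equal_build_stroke : Prop := ∀ (keys : List String), Dom_build_stroke keys → Pre_build_stroke keys → Spec_build_stroke keys (build_stroke keys)

-- ===== LEMMAS AND PROOFS =====

-- `sorted(l)` of ints all lying in [0, n) is the counting-sort list: each j repeated count-many times
def flatRep (c : Int → Nat) (n : Nat) : List Int :=
  (List.range n).flatMap (fun (j : Nat) => List.replicate (c (j:Int)) ((j:Int)))

theorem count_flatRep (c : Int → Nat) (v : Int) : ∀ (n : Nat),
    (flatRep c n).count v = if 0 ≤ v ∧ v < (n:Int) then c v else 0
  | 0 => by simp [flatRep]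
  | n+1 => by
    rw [flatRep, List.range_succ, List.flatMap_append, List.count_append,
      show (List.range n).flatMap (fun (j : Nat) => List.replicate (c (j:Int)) ((j:Int))) = flatRep c n from rfl,
      count_flatRep c v n]
    simp only [List.flatMap_cons, List.flatMap_nil, List.append_nil, List.count_replicate]
    by_cases hv : v = (n:Int)
    · subst hv; simp
    · have : ((n:Int) == v) = false := by simpa using (fun h => hv h.symm)
      rw [this]
      push_cast
      split_ifs <;> omega

theorem mem_flatRep (c : Int → Nat) (n : Nat) (x : Int) (hx : x ∈ flatRep c n) :
    0 ≤ x ∧ x < (n:Int) := by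
  rcases List.mem_flatMap.1 hx with ⟨j, hj, hmem⟩
  rcases List.eq_of_mem_replicate hmem with rfl
  have := List.mem_range.1 hj
  constructor
  · positivity
  · exact_mod_cast this

theorem pairwise_flatRep (c : Int → Nat) : ∀ (n : Nat),
    (flatRep c n).Pairwise (· ≤ ·)
  | 0 => by simp [flatRep]
  | n+1 => by
    rw [flatRep, List.range_succ, List.flatMap_append, List.pairwise_append]
    refine ⟨pairwise_flatRep c n, ?_, ?_⟩
    · simp [List.pairwise_replicate]
    · intro x hx y hy
      have := mem_flatRep c n x hx
      simp only [List.flatMap_cons, List.flatMap_nil, List.append_nil] at hy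
      rcases List.eq_of_mem_replicate hy with rfl
      omega

theorem sorted_eq_flatRep (l : List Int) (n : Nat) (h : ∀ x ∈ l, 0 ≤ x ∧ x < (n:Int)) :
    PySem.List.sorted l (fun x => x) false = flatRep (fun v => l.count v) n := by
  apply PySem.List.sorted_id_eq_of_perm_of_pairwise
  · rw [List.perm_iff_count]
    intro v
    rw [count_flatRep]
    split_ifs with hv
    · rfl
    · symm; rw [List.count_eq_zero]
      intro hm; exact hv (h v hm)
  · exact pairwise_flatRep _ n

-- the counting loop of B, entrywise
theorem foldModify_getElem? (l : List Nat) (cs : List Int) (j : Nat) :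
    (l.foldl (fun cs x => cs.modify x (· + 1)) cs)[j]?
      = cs[j]?.map (· + (l.count j : Int)) := by
  induction l generalizing cs with
  | nil => cases h : cs[j]? <;> simp [h]
  | cons x l ih =>
    rw [List.foldl_cons, ih (cs.modify x (· + 1)), List.getElem?_modify]
    by_cases hx : x = j
    · subst hx
      cases hcs : cs[x]? <;> simp [hcs, List.count_cons] <;> push_cast <;> ring
    · have : (j == x) = false := by simpa using fun h => hx h.symm
      simp [hx, List.count_cons, this]

theorem count_map_toNat (l : List Int) (h : ∀ x ∈ l, 0 ≤ x) (j : Nat) :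
    (l.map Int.toNat).count j = l.count (j:Int) := by
  induction l with
  | nil => rfl
  | cons x l ih =>
    have hx := h x (by simp)
    have ih' := ih (fun y hy => h y (by simp [hy]))
    simp only [List.map_cons, List.count_cons, ih']
    congr 1
    have : (x.toNat == j) = ((x : Int) == (j:Int)) := by
      by_cases hxx : x = (j:Int)
      · subst hxx; simp
      · have h1 : (x.toNat == j) = false := by
          simp only [beq_eq_false_iff_ne, ne_eq]
          intro hc; exact hxx (by omega)
        have h2 : (x == (j:Int)) = false := by simpa using hxx
        rw [h1, h2]
    simp [this]

-- A's separator loop on a clean prefix, then vowels, then right-hand keys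
theorem sepLoop_spec (V R : List String)
    (hV : ∀ v ∈ V, PySem.Str.isIn v "AO*EU" = true)
    (hR : ∀ r ∈ R, PySem.Str.isIn r "AO*EU" = false ∧ PySem.Str.startswith r "-" = true) :
    ∀ (X : List String) (n : Int) (acc : List String),
    (∀ x ∈ X, PySem.Str.isIn x "AO*EU" = false ∧ PySem.Str.startswith x "-" = false) →
    bsSepLoop (PySem.List.enumerate (X ++ V ++ R) n) acc
      = if V = [] then (if R = [] then acc else PySem.List.insert acc (n + (X.length : Int)) " ")
        else acc
  | [], n, acc, _ => by
    cases V with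
    | cons v V' =>
      rw [List.nil_append, List.cons_append, PySem.List.enumerate_cons]
      have h' := hV v (by simp)
      simp at h'
      simp only [bsSepLoop]
      simp [h']
    | nil =>
      cases R with
      | nil => simp [bsSepLoop, PySem.List.enumerate_nil]
      | cons r R' =>
        rw [List.nil_append, List.nil_append, PySem.List.enumerate_cons]
        have h1 := (hR r (by simp)).1
        have h2 := (hR r (by simp)).2
        simp at h1 h2
        simp only [bsSepLoop]
        simp [h1, h2]
  | x :: X', n, acc, hX => by
    rw [show (x :: X') ++ V ++ R = x :: (X' ++ V ++ R) from by simp,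
      PySem.List.enumerate_cons]
    have h1 := (hX x (by simp)).1
    have h2 := (hX x (by simp)).2
    simp at h1 h2
    rw [show bsSepLoop ((n, x) :: PySem.List.enumerate (X' ++ V ++ R) (n+1)) acc
        = bsSepLoop (PySem.List.enumerate (X' ++ V ++ R) (n+1)) acc from by
      simp only [bsSepLoop]; simp [h1, h2]]
    rw [sepLoop_spec V R hV hR X' (n+1) acc (fun y hy => hX y (by simp [hy]))]
    have h3 : n + 1 + (X'.length : Int) = n + ((x :: X').length : Int) := by
      simp; ring
    rw [h3]

-- the sorted, mapped-back key list, slot by slot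
theorem keys3_expand (c : Int → Nat) :
    (flatRep c 22).map (fun key => (PySem.List.pyGet? bsOrder key).getD "")
  = (List.replicate (c 0) "S-" ++ List.replicate (c 1) "T-" ++ List.replicate (c 2) "K-"
      ++ List.replicate (c 3) "P-" ++ List.replicate (c 4) "W-" ++ List.replicate (c 5) "H-"
      ++ List.replicate (c 6) "R-")
    ++ (List.replicate (c 7) "A" ++ List.replicate (c 8) "O" ++ List.replicate (c 9) "*"
      ++ List.replicate (c 10) "E" ++ List.replicate (c 11) "U")
    ++ (List.replicate (c 12) "-F" ++ List.replicate (c 13) "-R" ++ List.replicate (c 14) "-P"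
      ++ List.replicate (c 15) "-B" ++ List.replicate (c 16) "-L" ++ List.replicate (c 17) "-G"
      ++ List.replicate (c 18) "-T" ++ List.replicate (c 19) "-S" ++ List.replicate (c 20) "-D"
      ++ List.replicate (c 21) "-Z") := by
  simp only [flatRep, show List.range 22 = [0,1,2,3,4,5,6,7,8,9,10,11,12,13,14,15,16,17,18,19,20,21] from rfl,
    List.flatMap_cons, List.flatMap_nil, List.map_append, List.map_replicate, List.append_nil, Nat.cast_ofNat,
    Nat.cast_zero, Nat.cast_one]
  norm_num
  simp only [show ((PySem.List.pyGet? bsOrder (0:Int)).getD "") = "S-" from rfl,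
    show ((PySem.List.pyGet? bsOrder (1:Int)).getD "") = "T-" from rfl,
    show ((PySem.List.pyGet? bsOrder (2:Int)).getD "") = "K-" from rfl,
    show ((PySem.List.pyGet? bsOrder (3:Int)).getD "") = "P-" from rfl,
    show ((PySem.List.pyGet? bsOrder (4:Int)).getD "") = "W-" from rfl,
    show ((PySem.List.pyGet? bsOrder (5:Int)).getD "") = "H-" from rfl,
    show ((PySem.List.pyGet? bsOrder (6:Int)).getD "") = "R-" from rfl,
    show ((PySem.List.pyGet? bsOrder (7:Int)).getD "") = "A" from rfl,
    show ((PySem.List.pyGet? bsOrder (8:Int)).getD "") = "O" from rfl,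
    show ((PySem.List.pyGet? bsOrder (9:Int)).getD "") = "*" from rfl,
    show ((PySem.List.pyGet? bsOrder (10:Int)).getD "") = "E" from rfl,
    show ((PySem.List.pyGet? bsOrder (11:Int)).getD "") = "U" from rfl,
    show ((PySem.List.pyGet? bsOrder (12:Int)).getD "") = "-F" from rfl,
    show ((PySem.List.pyGet? bsOrder (13:Int)).getD "") = "-R" from rfl,
    show ((PySem.List.pyGet? bsOrder (14:Int)).getD "") = "-P" from rfl,
    show ((PySem.List.pyGet? bsOrder (15:Int)).getD "") = "-B" from rfl,
    show ((PySem.List.pyGet? bsOrder (16:Int)).getD "") = "-L" from rfl,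
    show ((PySem.List.pyGet? bsOrder (17:Int)).getD "") = "-G" from rfl,
    show ((PySem.List.pyGet? bsOrder (18:Int)).getD "") = "-T" from rfl,
    show ((PySem.List.pyGet? bsOrder (19:Int)).getD "") = "-S" from rfl,
    show ((PySem.List.pyGet? bsOrder (20:Int)).getD "") = "-D" from rfl,
    show ((PySem.List.pyGet? bsOrder (21:Int)).getD "") = "-Z" from rfl]

theorem chars_join_empty : ∀ (parts : List (List Char)), PySem.Chars.join [] parts = parts.flatten
  | [] => PySem.Chars.join_nil []
  | [p] => by simp [PySem.Chars.join_singleton]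
  | p :: q :: rest => by
    rw [PySem.Chars.join_cons_cons, chars_join_empty (q :: rest)]
    simp

theorem flatten_replicate_single (n : Nat) (a : Char) :
    (List.replicate n [a]).flatten = List.replicate n a := by
  induction n with
  | zero => rfl
  | succ n ih => simp [List.replicate_succ, ih]

theorem strTimes_single (s : String) (a : Char) (hs : s.toList = [a]) (m : Nat) :
    strTimes s ((m:Nat):Int) = String.ofList (List.replicate m a) := by
  rw [strTimes, hs, PySem.List.pyRepeat_singleton]
  simp

theorem build_stroke_eq (keys : List String) (hPre : Pre_build_stroke keys) :
    build_stroke keys = build_stroke_alt keys := by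
  have hb : ∀ k ∈ bsOrder, 0 ≤ (bsTranslate.get? k).getD 0 ∧ (bsTranslate.get? k).getD 0 < (22:Int) := by decide
  have hrange : ∀ x ∈ keys.map (fun key => (bsTranslate.get? key).getD 0), 0 ≤ x ∧ x < ((22:Nat):Int) := by
    intro x hx
    rcases List.mem_map.1 hx with ⟨k, hk, rfl⟩
    exact_mod_cast hb k (hPre k hk)
  simp only [build_stroke, build_stroke_alt]
  rw [sorted_eq_flatRep _ 22 hrange]
  rw [keys3_expand]
  set kl := List.map (fun key => (bsTranslate.get? key).getD 0) keys with hkl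
  set X := List.replicate (List.count 0 kl) "S-" ++ List.replicate (List.count 1 kl) "T-"
      ++ List.replicate (List.count 2 kl) "K-" ++ List.replicate (List.count 3 kl) "P-"
      ++ List.replicate (List.count 4 kl) "W-" ++ List.replicate (List.count 5 kl) "H-"
      ++ List.replicate (List.count 6 kl) "R-" with hXdef
  set V := List.replicate (List.count 7 kl) "A" ++ List.replicate (List.count 8 kl) "O"
      ++ List.replicate (List.count 9 kl) "*" ++ List.replicate (List.count 10 kl) "E"
      ++ List.replicate (List.count 11 kl) "U" with hVdef
  set R := List.replicate (List.count 12 kl) "-F" ++ List.replicate (List.count 13 kl) "-R"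
      ++ List.replicate (List.count 14 kl) "-P" ++ List.replicate (List.count 15 kl) "-B"
      ++ List.replicate (List.count 16 kl) "-L" ++ List.replicate (List.count 17 kl) "-G"
      ++ List.replicate (List.count 18 kl) "-T" ++ List.replicate (List.count 19 kl) "-S"
      ++ List.replicate (List.count 20 kl) "-D" ++ List.replicate (List.count 21 kl) "-Z" with hRdef
  have hXc : ∀ x ∈ X, PySem.Str.isIn x "AO*EU" = false ∧ PySem.Str.startswith x "-" = false := by
    intro x hx
    simp [hXdef, List.mem_append, List.mem_replicate] at hx
    rcases hx with ⟨-,rfl⟩|⟨-,rfl⟩|⟨-,rfl⟩|⟨-,rfl⟩|⟨-,rfl⟩|⟨-,rfl⟩|⟨-,rfl⟩ <;> decide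
  have hVc : ∀ v ∈ V, PySem.Str.isIn v "AO*EU" = true := by
    intro v hv
    simp [hVdef, List.mem_append, List.mem_replicate] at hv
    rcases hv with ⟨-,rfl⟩|⟨-,rfl⟩|⟨-,rfl⟩|⟨-,rfl⟩|⟨-,rfl⟩ <;> decide
  have hRc : ∀ r ∈ R, PySem.Str.isIn r "AO*EU" = false ∧ PySem.Str.startswith r "-" = true := by
    intro r hr
    simp [hRdef, List.mem_append, List.mem_replicate] at hr
    rcases hr with ⟨-,rfl⟩|⟨-,rfl⟩|⟨-,rfl⟩|⟨-,rfl⟩|⟨-,rfl⟩|⟨-,rfl⟩|⟨-,rfl⟩|⟨-,rfl⟩|⟨-,rfl⟩|⟨-,rfl⟩ <;> decide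
  rw [sepLoop_spec V R hVc hRc X 0 (X ++ V ++ R) hXc]
  -- B side: the counting loop yields the 22 per-slot counts
  set cl : List Int := [(List.count 0 kl : Int), (List.count 1 kl : Int), (List.count 2 kl : Int),
      (List.count 3 kl : Int), (List.count 4 kl : Int), (List.count 5 kl : Int), (List.count 6 kl : Int),
      (List.count 7 kl : Int), (List.count 8 kl : Int), (List.count 9 kl : Int), (List.count 10 kl : Int),
      (List.count 11 kl : Int), (List.count 12 kl : Int), (List.count 13 kl : Int), (List.count 14 kl : Int),
      (List.count 15 kl : Int), (List.count 16 kl : Int), (List.count 17 kl : Int), (List.count 18 kl : Int),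
      (List.count 19 kl : Int), (List.count 20 kl : Int), (List.count 21 kl : Int)] with hcl
  have hcm : ∀ j : Nat, (keys.map (fun key => ((bsIndexB.get? key).getD 0).toNat)).count j = List.count ((j:Nat):Int) kl := by
    intro j
    rw [show (fun key => ((bsIndexB.get? key).getD 0).toNat)
        = (Int.toNat ∘ fun key => (bsTranslate.get? key).getD 0) from rfl]
    rw [← List.map_map, ← hkl]
    exact count_map_toNat kl (fun x hx => (hrange x hx).1) j
  have hcounts : List.foldl (fun cs key => cs.modify ((bsIndexB.get? key).getD 0).toNat (· + 1))
      (List.replicate (PySem.List.len bsOrderB).toNat (0:Int)) keys = cl := by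
    rw [show List.foldl (fun cs key => cs.modify ((bsIndexB.get? key).getD 0).toNat (· + 1))
          (List.replicate (PySem.List.len bsOrderB).toNat (0:Int)) keys
        = List.foldl (fun cs x => cs.modify x (· + 1)) (List.replicate (PySem.List.len bsOrderB).toNat (0:Int))
            (keys.map (fun key => ((bsIndexB.get? key).getD 0).toNat)) from by rw [List.foldl_map]]
    apply List.ext_getElem?
    intro j
    rw [foldModify_getElem?, hcm j]
    rcases Nat.lt_or_ge j 22 with hj | hj
    · interval_cases j <;> simp [hcl, bsOrderB]
    · rw [List.getElem?_eq_none (by simp [bsOrderB]; omega), hcl,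
        List.getElem?_eq_none (by simp; omega)]
      rfl
  rw [hcounts]
  rw [show PySem.List.slice cl (some 12) none = [(List.count 12 kl : Int), (List.count 13 kl : Int), (List.count 14 kl : Int), (List.count 15 kl : Int), (List.count 16 kl : Int), (List.count 17 kl : Int), (List.count 18 kl : Int), (List.count 19 kl : Int), (List.count 20 kl : Int), (List.count 21 kl : Int)] from by rw [hcl]; rfl,
      show PySem.List.slice cl (some 7) (some 12) = [(List.count 7 kl : Int), (List.count 8 kl : Int), (List.count 9 kl : Int), (List.count 10 kl : Int), (List.count 11 kl : Int)] from by rw [hcl]; rfl,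
      show PySem.List.pyRange 0 12 1 = [0,1,2,3,4,5,6,7,8,9,10,11] from by decide,
      show PySem.List.pyRange 12 (PySem.List.len bsOrderB) 1 = [12,13,14,15,16,17,18,19,20,21] from by decide]
  simp only [List.map_cons, List.map_nil]
  rw [show PySem.List.pyGetD cl (0:Int) 0 = (List.count 0 kl : Int) from by rw [hcl]; rfl,
      show PySem.List.pyGetD cl (1:Int) 0 = (List.count 1 kl : Int) from by rw [hcl]; rfl,
      show PySem.List.pyGetD cl (2:Int) 0 = (List.count 2 kl : Int) from by rw [hcl]; rfl,
      show PySem.List.pyGetD cl (3:Int) 0 = (List.count 3 kl : Int) from by rw [hcl]; rfl,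
      show PySem.List.pyGetD cl (4:Int) 0 = (List.count 4 kl : Int) from by rw [hcl]; rfl,
      show PySem.List.pyGetD cl (5:Int) 0 = (List.count 5 kl : Int) from by rw [hcl]; rfl,
      show PySem.List.pyGetD cl (6:Int) 0 = (List.count 6 kl : Int) from by rw [hcl]; rfl,
      show PySem.List.pyGetD cl (7:Int) 0 = (List.count 7 kl : Int) from by rw [hcl]; rfl,
      show PySem.List.pyGetD cl (8:Int) 0 = (List.count 8 kl : Int) from by rw [hcl]; rfl,
      show PySem.List.pyGetD cl (9:Int) 0 = (List.count 9 kl : Int) from by rw [hcl]; rfl,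
      show PySem.List.pyGetD cl (10:Int) 0 = (List.count 10 kl : Int) from by rw [hcl]; rfl,
      show PySem.List.pyGetD cl (11:Int) 0 = (List.count 11 kl : Int) from by rw [hcl]; rfl,
      show PySem.List.pyGetD cl (12:Int) 0 = (List.count 12 kl : Int) from by rw [hcl]; rfl,
      show PySem.List.pyGetD cl (13:Int) 0 = (List.count 13 kl : Int) from by rw [hcl]; rfl,
      show PySem.List.pyGetD cl (14:Int) 0 = (List.count 14 kl : Int) from by rw [hcl]; rfl,
      show PySem.List.pyGetD cl (15:Int) 0 = (List.count 15 kl : Int) from by rw [hcl]; rfl,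
      show PySem.List.pyGetD cl (16:Int) 0 = (List.count 16 kl : Int) from by rw [hcl]; rfl,
      show PySem.List.pyGetD cl (17:Int) 0 = (List.count 17 kl : Int) from by rw [hcl]; rfl,
      show PySem.List.pyGetD cl (18:Int) 0 = (List.count 18 kl : Int) from by rw [hcl]; rfl,
      show PySem.List.pyGetD cl (19:Int) 0 = (List.count 19 kl : Int) from by rw [hcl]; rfl,
      show PySem.List.pyGetD cl (20:Int) 0 = (List.count 20 kl : Int) from by rw [hcl]; rfl,
      show PySem.List.pyGetD cl (21:Int) 0 = (List.count 21 kl : Int) from by rw [hcl]; rfl]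
  rw [show PySem.Str.stripChars (PySem.List.pyGetD bsOrderB (0:Int) "") "-" = "S" from rfl,
      show PySem.Str.stripChars (PySem.List.pyGetD bsOrderB (1:Int) "") "-" = "T" from rfl,
      show PySem.Str.stripChars (PySem.List.pyGetD bsOrderB (2:Int) "") "-" = "K" from rfl,
      show PySem.Str.stripChars (PySem.List.pyGetD bsOrderB (3:Int) "") "-" = "P" from rfl,
      show PySem.Str.stripChars (PySem.List.pyGetD bsOrderB (4:Int) "") "-" = "W" from rfl,
      show PySem.Str.stripChars (PySem.List.pyGetD bsOrderB (5:Int) "") "-" = "H" from rfl,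
      show PySem.Str.stripChars (PySem.List.pyGetD bsOrderB (6:Int) "") "-" = "R" from rfl,
      show PySem.Str.stripChars (PySem.List.pyGetD bsOrderB (7:Int) "") "-" = "A" from rfl,
      show PySem.Str.stripChars (PySem.List.pyGetD bsOrderB (8:Int) "") "-" = "O" from rfl,
      show PySem.Str.stripChars (PySem.List.pyGetD bsOrderB (9:Int) "") "-" = "*" from rfl,
      show PySem.Str.stripChars (PySem.List.pyGetD bsOrderB (10:Int) "") "-" = "E" from rfl,
      show PySem.Str.stripChars (PySem.List.pyGetD bsOrderB (11:Int) "") "-" = "U" from rfl,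
      show PySem.Str.stripChars (PySem.List.pyGetD bsOrderB (12:Int) "") "-" = "F" from rfl,
      show PySem.Str.stripChars (PySem.List.pyGetD bsOrderB (13:Int) "") "-" = "R" from rfl,
      show PySem.Str.stripChars (PySem.List.pyGetD bsOrderB (14:Int) "") "-" = "P" from rfl,
      show PySem.Str.stripChars (PySem.List.pyGetD bsOrderB (15:Int) "") "-" = "B" from rfl,
      show PySem.Str.stripChars (PySem.List.pyGetD bsOrderB (16:Int) "") "-" = "L" from rfl,
      show PySem.Str.stripChars (PySem.List.pyGetD bsOrderB (17:Int) "") "-" = "G" from rfl,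
      show PySem.Str.stripChars (PySem.List.pyGetD bsOrderB (18:Int) "") "-" = "T" from rfl,
      show PySem.Str.stripChars (PySem.List.pyGetD bsOrderB (19:Int) "") "-" = "S" from rfl,
      show PySem.Str.stripChars (PySem.List.pyGetD bsOrderB (20:Int) "") "-" = "D" from rfl,
      show PySem.Str.stripChars (PySem.List.pyGetD bsOrderB (21:Int) "") "-" = "Z" from rfl]
  rw [strTimes_single "S" 'S' rfl (List.count 0 kl),
      strTimes_single "T" 'T' rfl (List.count 1 kl),
      strTimes_single "K" 'K' rfl (List.count 2 kl),
      strTimes_single "P" 'P' rfl (List.count 3 kl),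
      strTimes_single "W" 'W' rfl (List.count 4 kl),
      strTimes_single "H" 'H' rfl (List.count 5 kl),
      strTimes_single "R" 'R' rfl (List.count 6 kl),
      strTimes_single "A" 'A' rfl (List.count 7 kl),
      strTimes_single "O" 'O' rfl (List.count 8 kl),
      strTimes_single "*" '*' rfl (List.count 9 kl),
      strTimes_single "E" 'E' rfl (List.count 10 kl),
      strTimes_single "U" 'U' rfl (List.count 11 kl),
      strTimes_single "F" 'F' rfl (List.count 12 kl),
      strTimes_single "R" 'R' rfl (List.count 13 kl),
      strTimes_single "P" 'P' rfl (List.count 14 kl),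
      strTimes_single "B" 'B' rfl (List.count 15 kl),
      strTimes_single "L" 'L' rfl (List.count 16 kl),
      strTimes_single "G" 'G' rfl (List.count 17 kl),
      strTimes_single "T" 'T' rfl (List.count 18 kl),
      strTimes_single "S" 'S' rfl (List.count 19 kl),
      strTimes_single "D" 'D' rfl (List.count 20 kl),
      strTimes_single "Z" 'Z' rfl (List.count 21 kl)]
  have hrp0 : String.toList (PySem.Str.replace (PySem.Str.replace "S-" "-" "") " " "-") = ['S'] := rfl
  have hrp1 : String.toList (PySem.Str.replace (PySem.Str.replace "T-" "-" "") " " "-") = ['T'] := rfl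
  have hrp2 : String.toList (PySem.Str.replace (PySem.Str.replace "K-" "-" "") " " "-") = ['K'] := rfl
  have hrp3 : String.toList (PySem.Str.replace (PySem.Str.replace "P-" "-" "") " " "-") = ['P'] := rfl
  have hrp4 : String.toList (PySem.Str.replace (PySem.Str.replace "W-" "-" "") " " "-") = ['W'] := rfl
  have hrp5 : String.toList (PySem.Str.replace (PySem.Str.replace "H-" "-" "") " " "-") = ['H'] := rfl
  have hrp6 : String.toList (PySem.Str.replace (PySem.Str.replace "R-" "-" "") " " "-") = ['R'] := rfl
  have hrp7 : String.toList (PySem.Str.replace (PySem.Str.replace "A" "-" "") " " "-") = ['A'] := rfl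
  have hrp8 : String.toList (PySem.Str.replace (PySem.Str.replace "O" "-" "") " " "-") = ['O'] := rfl
  have hrp9 : String.toList (PySem.Str.replace (PySem.Str.replace "*" "-" "") " " "-") = ['*'] := rfl
  have hrp10 : String.toList (PySem.Str.replace (PySem.Str.replace "E" "-" "") " " "-") = ['E'] := rfl
  have hrp11 : String.toList (PySem.Str.replace (PySem.Str.replace "U" "-" "") " " "-") = ['U'] := rfl
  have hrp12 : String.toList (PySem.Str.replace (PySem.Str.replace "-F" "-" "") " " "-") = ['F'] := rfl
  have hrp13 : String.toList (PySem.Str.replace (PySem.Str.replace "-R" "-" "") " " "-") = ['R'] := rfl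
  have hrp14 : String.toList (PySem.Str.replace (PySem.Str.replace "-P" "-" "") " " "-") = ['P'] := rfl
  have hrp15 : String.toList (PySem.Str.replace (PySem.Str.replace "-B" "-" "") " " "-") = ['B'] := rfl
  have hrp16 : String.toList (PySem.Str.replace (PySem.Str.replace "-L" "-" "") " " "-") = ['L'] := rfl
  have hrp17 : String.toList (PySem.Str.replace (PySem.Str.replace "-G" "-" "") " " "-") = ['G'] := rfl
  have hrp18 : String.toList (PySem.Str.replace (PySem.Str.replace "-T" "-" "") " " "-") = ['T'] := rfl
  have hrp19 : String.toList (PySem.Str.replace (PySem.Str.replace "-S" "-" "") " " "-") = ['S'] := rfl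
  have hrp20 : String.toList (PySem.Str.replace (PySem.Str.replace "-D" "-" "") " " "-") = ['D'] := rfl
  have hrp21 : String.toList (PySem.Str.replace (PySem.Str.replace "-Z" "-" "") " " "-") = ['Z'] := rfl
  have hrpsp : String.toList (PySem.Str.replace (PySem.Str.replace " " "-" "") " " "-") = ['-'] := rfl
  by_cases hVz : V = []
  · by_cases hRz : R = []
    · -- no vowels, no right-hand keys
      rw [if_pos hVz, if_pos hRz]
      have hzV : List.count 7 kl = 0 ∧ List.count 8 kl = 0 ∧ List.count 9 kl = 0 ∧ List.count 10 kl = 0 ∧ List.count 11 kl = 0 := by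
        rw [hVdef] at hVz; simpa using hVz
      obtain ⟨h7,h8,h9,h10,h11⟩ := hzV
      have hzR : List.count 12 kl = 0 ∧ List.count 13 kl = 0 ∧ List.count 14 kl = 0 ∧ List.count 15 kl = 0 ∧ List.count 16 kl = 0 ∧ List.count 17 kl = 0 ∧ List.count 18 kl = 0 ∧ List.count 19 kl = 0 ∧ List.count 20 kl = 0 ∧ List.count 21 kl = 0 := by
        rw [hRdef] at hRz; simpa using hRz
      obtain ⟨h12,h13,h14,h15,h16,h17,h18,h19,h20,h21⟩ := hzR
      rw [hVz, hRz]
      rw [h7, h8, h9, h10, h11, h12, h13, h14, h15, h16, h17, h18, h19, h20, h21]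
      rw [if_neg (by decide)]
      refine String.toList_inj.mp ?_
      rw [PySem.Str.toList_join, PySem.Str.toList_join, show ("" : String).toList = [] from rfl,
        chars_join_empty, chars_join_empty]
      simp only [hXdef, hVdef, hRdef, List.map_append, List.map_map, List.map_replicate,
        List.map_cons, List.map_nil, Function.comp,
        hrp0, hrp1, hrp2, hrp3, hrp4, hrp5, hrp6, hrp7, hrp8, hrp9, hrp10, hrp11, hrp12, hrp13, hrp14, hrp15, hrp16, hrp17, hrp18, hrp19, hrp20, hrp21, hrpsp, String.toList_ofList,
        List.flatten_append, List.flatten_cons, List.flatten_nil, flatten_replicate_single]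
      simp [List.append_assoc]
    · -- no vowels, some right-hand key: the separator is inserted
      rw [if_pos hVz, if_neg hRz]
      have hzV : List.count 7 kl = 0 ∧ List.count 8 kl = 0 ∧ List.count 9 kl = 0 ∧ List.count 10 kl = 0 ∧ List.count 11 kl = 0 := by
        rw [hVdef] at hVz; simpa using hVz
      obtain ⟨h7,h8,h9,h10,h11⟩ := hzV
      have hra : ([(List.count 12 kl : Int), (List.count 13 kl : Int), (List.count 14 kl : Int), (List.count 15 kl : Int), (List.count 16 kl : Int), (List.count 17 kl : Int), (List.count 18 kl : Int), (List.count 19 kl : Int), (List.count 20 kl : Int), (List.count 21 kl : Int)].any (fun c => c != 0)) = true := by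
        by_contra hco
        simp at hco
        exact hRz (by rw [hRdef]; simp [hco.1, hco.2.1, hco.2.2.1, hco.2.2.2.1, hco.2.2.2.2.1, hco.2.2.2.2.2.1, hco.2.2.2.2.2.2.1, hco.2.2.2.2.2.2.2.1, hco.2.2.2.2.2.2.2.2.1, hco.2.2.2.2.2.2.2.2.2])
      rw [hVz]
      simp only [List.append_nil]
      rw [zero_add, PySem.List.insert_natCast (X ++ R) X.length " " (by simp),
        List.take_left, List.drop_left]
      rw [h7,h8,h9,h10,h11]
      rw [if_pos (by rw [hra]; rfl)]
      refine String.toList_inj.mp ?_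
      rw [PySem.Str.toList_join, PySem.Str.toList_join, show ("" : String).toList = [] from rfl,
        chars_join_empty, chars_join_empty]
      simp only [hXdef, hVdef, hRdef, List.map_append, List.map_map, List.map_replicate,
        List.map_cons, List.map_nil, Function.comp,
        hrp0, hrp1, hrp2, hrp3, hrp4, hrp5, hrp6, hrp7, hrp8, hrp9, hrp10, hrp11, hrp12, hrp13, hrp14, hrp15, hrp16, hrp17, hrp18, hrp19, hrp20, hrp21, hrpsp, String.toList_ofList,
        List.flatten_append, List.flatten_cons, List.flatten_nil, flatten_replicate_single]
      simp [List.append_assoc]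
  · -- a vowel is present: no separator
    rw [if_neg hVz]
    have hva : ([(List.count 7 kl : Int), (List.count 8 kl : Int), (List.count 9 kl : Int), (List.count 10 kl : Int), (List.count 11 kl : Int)].any (fun c => c != 0)) = true := by
      by_contra hco
      simp at hco
      exact hVz (by rw [hVdef]; simp [hco.1, hco.2.1, hco.2.2.1, hco.2.2.2.1, hco.2.2.2.2])
    rw [if_neg (by rw [hva]; simp)]
    refine String.toList_inj.mp ?_
    rw [PySem.Str.toList_join, PySem.Str.toList_join, show ("" : String).toList = [] from rfl,
      chars_join_empty, chars_join_empty]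
    simp only [hXdef, hVdef, hRdef, List.map_append, List.map_map, List.map_replicate,
      List.map_cons, List.map_nil, Function.comp,
      hrp0, hrp1, hrp2, hrp3, hrp4, hrp5, hrp6, hrp7, hrp8, hrp9, hrp10, hrp11, hrp12, hrp13, hrp14, hrp15, hrp16, hrp17, hrp18, hrp19, hrp20, hrp21, hrpsp, String.toList_ofList,
      List.flatten_append, List.flatten_cons, List.flatten_nil, flatten_replicate_single]
    simp [List.append_assoc]


-- ===== VERDICT (by name: the statement is the Claim_ definition above) =====
theorem build_stroke_spec : Claim_equal_build_stroke := by
  intro keys _ hPre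
  unfold Spec_build_stroke
  exact build_stroke_eq keys hPre
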